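-- pv_equiv track=rewrite | github.com/stop16/DMU-RG-EXPO-2025 | Arduino/Merge/Merged_Type3/render_dotmatrix.py | tokenize_initializer_block
-- ===== SOURCE A (Python) =====
-- from typing import Dict, Iterable, List, Sequence
--
-- def strip_line_comment(fragment: str) -> str:
--     """Return the fragment without trailing // comments."""
--     idx = fragment.find("//")
--     return fragment[:idx] if idx != -1 else fragment
--
-- def tokenize_initializer_block(block: str) -> List[str]:
--     """Split a C-style initializer block into clean tokens."""
--     tokens: List[str] = []
--     for raw_line in block.splitlines():
--         clean_line = strip_line_comment(raw_line).strip()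
--         if not clean_line:
--             continue
--         for part in clean_line.split(","):
--             token = part.strip()
--             if token:
--                 tokens.append(token)
--     return tokens
-- ===== SOURCE B (Python) =====
-- from typing import List
--
--
-- def strip_line_comment(fragment: str) -> str:
--     """Return the fragment without trailing // comments."""
--     idx = fragment.find("//")
--     return fragment[:idx] if idx != -1 else fragment
--
--
-- def tokenize_initializer_block(block: str) -> List[str]:
--     """Flatten-then-single-split: strip comments per line, join the lines with
--     ',' so newlines and commas become one uniform delimiter, split once."""
--     lines = [strip_line_comment(raw_line) for raw_line in block.splitlines()]
--     joined = ",".join(lines)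
--     return [token for token in (part.strip() for part in joined.split(",")) if token]
-- ===== Notes on version B (the rewrite author's own statement) =====
-- stated objective: alternative
-- what changed: A runs nested loops (per line, then per comma-separated field, appending tokens with an emptiness skip); B strips comments per line, joins the stripped lines with the comma delimiter so newlines and commas become one uniform separator, splits that single string once, and keeps the stripped non-empty fields.
import Mathlib
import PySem

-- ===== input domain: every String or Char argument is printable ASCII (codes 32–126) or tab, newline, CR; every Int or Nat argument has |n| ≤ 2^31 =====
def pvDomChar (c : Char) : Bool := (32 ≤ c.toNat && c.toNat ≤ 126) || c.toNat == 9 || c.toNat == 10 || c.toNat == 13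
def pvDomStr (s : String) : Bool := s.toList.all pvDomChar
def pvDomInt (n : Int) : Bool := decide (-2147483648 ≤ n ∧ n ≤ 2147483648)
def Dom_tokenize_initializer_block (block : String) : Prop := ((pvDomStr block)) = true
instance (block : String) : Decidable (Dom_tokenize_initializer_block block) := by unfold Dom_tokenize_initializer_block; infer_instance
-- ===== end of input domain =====

-- B replaces A's nested per-line/per-comma loops by: strip comments per line, join the lines
-- with ',' (one uniform delimiter), split once, strip and keep non-empty fields ("alternative").

-- ===== PORT A =====
def strip_line_comment (fragment : String) : String :=
  let idx := PySem.Str.find fragment "//"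
  if idx ≠ -1 then PySem.Str.slice fragment none (some idx) else fragment

def tokenize_initializer_block (block : String) : List String :=
  let tokens : List String := []
  (PySem.Str.splitlines block).foldl
    (fun tokens raw_line =>
      let clean_line := PySem.Str.strip (strip_line_comment raw_line)
      if clean_line = "" then tokens
      else
        ((PySem.Str.split? clean_line ",").getD []).foldl
          (fun tokens part =>
            let token := PySem.Str.strip part
            if token = "" then tokens else tokens ++ [token])
          tokens)
    tokens

-- ===== PORT B =====
def tokenize_initializer_block_alt (block : String) : List String :=
  let lines := (PySem.Str.splitlines block).map strip_line_comment
  let joined := PySem.Str.join "," lines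
  (((PySem.Str.split? joined ",").getD []).map PySem.Str.strip).filter (fun token => token ≠ "")

-- ===== PRECONDITION & SPEC =====
def Spec_tokenize_initializer_block (block : String) (out : List String) : Prop := out = tokenize_initializer_block_alt block
instance (block : String) (out : List String) : Decidable (Spec_tokenize_initializer_block block out) := by unfold Spec_tokenize_initializer_block; infer_instance

-- ===== CLAIM (what is proved, stated in full; the proofs are below) =====
def Claim_equal_tokenize_initializer_block : Prop := ∀ (block : String), Dom_tokenize_initializer_block block → Spec_tokenize_initializer_block block (tokenize_initializer_block block)

-- ===== LEMMAS AND PROOFS =====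

-- A simple structural split on a single character (the shape splitOn has for a 1-char sep).
def charSplit (c : Char) : List Char → List (List Char)
  | [] => [[]]
  | d :: rest =>
    if d = c then [] :: charSplit c rest
    else
      match charSplit c rest with
      | [] => [[d]]
      | t :: ts => (d :: t) :: ts

-- the per-line chars-level comment stripper both ports share
def gComment (l : List Char) : List Char := (strip_line_comment (String.ofList l)).toList

-- chars-level tokens of one comma-delimited fragment
def tokLine (cs : List Char) : List (List Char) :=
  ((charSplit ',' cs).map PySem.Chars.strip).filter (fun t => t ≠ [])

theorem charSplit_ne_nil (c : Char) (cs : List Char) : charSplit c cs ≠ [] := by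
  cases cs with
  | nil => simp [charSplit]
  | cons d rest =>
    by_cases h : d = c
    · simp [charSplit, h]
    · rcases hrest : charSplit c rest with _ | ⟨t, ts⟩ <;> simp [charSplit, h, hrest]

theorem modifyHead_id' (xs : List (List Char)) : xs.modifyHead (fun t => t) = xs := by
  cases xs <;> simp

theorem splitOn_go_spec (c : Char) (fuel : Nat) (l cur : List Char)
    (acc : List (List Char)) (h : l.length < fuel) :
    PySem.Chars.splitOn.go [c] fuel l cur acc
      = acc.reverse ++ (charSplit c l).modifyHead (fun t => cur.reverse ++ t) := by
  induction fuel generalizing l cur acc with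
  | zero => omega
  | succ fuel ih =>
    cases l with
    | nil => simp [PySem.Chars.splitOn.go, charSplit]
    | cons d rest =>
      rw [PySem.Chars.splitOn.go.eq_def]
      simp only []
      have hlen : rest.length < fuel := by simp at h; omega
      by_cases hdc : d = c
      · have hpre : [c].isPrefixOf (d :: rest) = true := by simp [List.isPrefixOf, hdc]
        rw [if_pos hpre]
        have hdrop : List.drop [c].length (d :: rest) = rest := rfl
        rw [hdrop, ih rest [] (cur.reverse :: acc) hlen]
        simp [charSplit, hdc, modifyHead_id']
      · have hpre : [c].isPrefixOf (d :: rest) = false := by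
          simp [List.isPrefixOf]; exact fun hcd => (hdc hcd.symm).elim
        rw [if_neg (by simp [hpre])]
        rw [ih rest (d :: cur) acc hlen]
        obtain ⟨t, ts, hts⟩ := List.exists_cons_of_ne_nil (charSplit_ne_nil c rest)
        simp [charSplit, hdc, hts]

theorem splitOn_single (c : Char) (cs : List Char) :
    PySem.Chars.splitOn cs [c] = charSplit c cs := by
  unfold PySem.Chars.splitOn
  rw [splitOn_go_spec c (cs.length + 1) cs [] [] (by omega)]
  simp [modifyHead_id']

theorem charSplit_no_sep (c : Char) (xs : List Char) (h : ∀ d ∈ xs, d ≠ c) :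
    charSplit c xs = [xs] := by
  induction xs with
  | nil => simp [charSplit]
  | cons d rest ih =>
    have hd : d ≠ c := h d (by simp)
    have := ih (fun x hx => h x (by simp [hx]))
    simp [charSplit, hd, this]

theorem charSplit_append (c : Char) (a b : List Char) :
    charSplit c (a ++ c :: b) = charSplit c a ++ charSplit c b := by
  induction a with
  | nil => simp [charSplit]
  | cons d a' ih =>
    by_cases hdc : d = c
    · simp [charSplit, hdc, ih]
    · obtain ⟨t', ts', hts'⟩ := List.exists_cons_of_ne_nil (charSplit_ne_nil c a')
      have h2 : charSplit c (a' ++ c :: b) = t' :: (ts' ++ charSplit c b) := by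
        rw [ih, hts']; simp
      show charSplit c (d :: (a' ++ c :: b)) = charSplit c (d :: a') ++ charSplit c b
      simp only [charSplit, if_neg hdc, h2, hts']
      simp

theorem charSplit_intercalate (c : Char) (ls : List (List Char)) (h : ls ≠ []) :
    charSplit c (List.intercalate [c] ls) = ls.flatMap (charSplit c) := by
  induction ls with
  | nil => exact absurd rfl h
  | cons a r ih =>
    cases r with
    | nil => simp [List.intercalate]
    | cons b r' =>
      have : List.intercalate [c] (a :: b :: r') = a ++ c :: List.intercalate [c] (b :: r') := by
        simp [List.intercalate]
      rw [this, charSplit_append, ih (by simp)]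
      simp

-- strip machinery ---------------------------------------------------------

theorem lstrip_cons_space (c : Char) (t : List Char) (h : PySem.Chars.isspace c = true) :
    PySem.Chars.lstrip (c :: t) = PySem.Chars.lstrip t := by
  simp [PySem.Chars.lstrip, h]

theorem lstrip_cons_nonspace (c : Char) (t : List Char) (h : PySem.Chars.isspace c = false) :
    PySem.Chars.lstrip (c :: t) = c :: t := by
  simp [PySem.Chars.lstrip, h]

theorem rstrip_eq_nil_iff (xs : List Char) :
    PySem.Chars.rstrip xs = [] ↔ ∀ d ∈ xs, PySem.Chars.isspace d = true := by
  simp [PySem.Chars.rstrip, List.dropWhile_eq_nil_iff]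

theorem rstrip_cons (c : Char) (rest : List Char) :
    PySem.Chars.rstrip (c :: rest)
      = if PySem.Chars.isspace c = true ∧ PySem.Chars.rstrip rest = [] then []
        else c :: PySem.Chars.rstrip rest := by
  have hstart : PySem.Chars.rstrip (c :: rest)
      = (List.dropWhile PySem.Chars.isspace (rest.reverse ++ [c])).reverse := by
    simp [PySem.Chars.rstrip]
  rw [hstart, List.dropWhile_append]
  by_cases he : (List.dropWhile PySem.Chars.isspace rest.reverse).isEmpty = true
  · have hnil : PySem.Chars.rstrip rest = [] := by
      rw [List.isEmpty_iff] at he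
      simp [PySem.Chars.rstrip, he]
    rw [if_pos he]
    by_cases hc : PySem.Chars.isspace c = true
    · rw [if_pos ⟨hc, hnil⟩]
      simp [hc]
    · rw [if_neg (fun hh => hc hh.1)]
      simp [hc, hnil]
  · have hnnil : PySem.Chars.rstrip rest ≠ [] := by
      rw [List.isEmpty_iff] at he
      simp [PySem.Chars.rstrip]
      simpa using he
    rw [if_neg he, if_neg (fun hh => hnnil hh.2)]
    simp [PySem.Chars.rstrip]

theorem space_ne_comma {c : Char} (h : PySem.Chars.isspace c = true) : c ≠ ',' := by
  intro hc; rw [hc] at h; exact absurd h (by decide)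

theorem map_lstrip_charSplit_lstrip (cs : List Char) :
    (charSplit ',' (PySem.Chars.lstrip cs)).map PySem.Chars.lstrip
      = (charSplit ',' cs).map PySem.Chars.lstrip := by
  induction cs with
  | nil => rfl
  | cons c rest ih =>
    by_cases hc : PySem.Chars.isspace c = true
    · rw [lstrip_cons_space c rest hc, ih]
      obtain ⟨t, ts, hts⟩ := List.exists_cons_of_ne_nil (charSplit_ne_nil ',' rest)
      simp [charSplit, space_ne_comma hc, hts, lstrip_cons_space c t hc]
    · rw [lstrip_cons_nonspace c rest (by simpa using hc)]

theorem map_rstrip_charSplit_rstrip (cs : List Char) :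
    (charSplit ',' (PySem.Chars.rstrip cs)).map PySem.Chars.rstrip
      = (charSplit ',' cs).map PySem.Chars.rstrip := by
  induction cs with
  | nil => rfl
  | cons c rest ih =>
    rw [rstrip_cons]
    by_cases h : PySem.Chars.isspace c = true ∧ PySem.Chars.rstrip rest = []
    · rw [if_pos h]
      have hall : ∀ d ∈ (c :: rest), PySem.Chars.isspace d = true := by
        intro d hd
        rcases List.mem_cons.1 hd with hd | hd
        · rw [hd]; exact h.1
        · exact (rstrip_eq_nil_iff rest).1 h.2 d hd
      have hnos : ∀ d ∈ (c :: rest), d ≠ ',' := fun d hd => space_ne_comma (hall d hd)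
      rw [charSplit_no_sep ',' (c :: rest) hnos]
      simp only [charSplit, List.map_cons, List.map_nil]
      rw [(rstrip_eq_nil_iff _).2 hall]
      rfl
    · rw [if_neg h]
      by_cases hcc : c = ','
      · subst hcc
        have e1 : charSplit ',' (',' :: PySem.Chars.rstrip rest)
            = [] :: charSplit ',' (PySem.Chars.rstrip rest) := by simp [charSplit]
        have e2 : charSplit ',' (',' :: rest) = [] :: charSplit ',' rest := by
          simp [charSplit]
        rw [e1, e2, List.map_cons, List.map_cons, ih]
      · obtain ⟨t, ts, hts⟩ := List.exists_cons_of_ne_nil (charSplit_ne_nil ',' rest)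
        obtain ⟨t', ts', hts'⟩ :=
          List.exists_cons_of_ne_nil (charSplit_ne_nil ',' (PySem.Chars.rstrip rest))
        rw [hts, hts'] at ih
        simp only [List.map_cons] at ih
        rw [List.cons.injEq] at ih
        obtain ⟨iht, ihts⟩ := ih
        simp only [charSplit, if_neg hcc, hts, hts', List.map_cons]
        rw [rstrip_cons c t', rstrip_cons c t, iht, ihts]

theorem lstrip_rstrip_comm (s : List Char) :
    PySem.Chars.lstrip (PySem.Chars.rstrip s) = PySem.Chars.rstrip (PySem.Chars.lstrip s) := by
  induction s with
  | nil => rfl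
  | cons c rest ih =>
    by_cases hc : PySem.Chars.isspace c = true
    · rw [rstrip_cons]
      by_cases hr : PySem.Chars.rstrip rest = []
      · rw [if_pos ⟨hc, hr⟩, lstrip_cons_space c rest hc, ← ih, hr]
      · rw [if_neg (fun hh => hr hh.2), lstrip_cons_space c (PySem.Chars.rstrip rest) hc,
          lstrip_cons_space c rest hc, ih]
    · have hc' : PySem.Chars.isspace c = false := by simpa using hc
      rw [rstrip_cons, if_neg (fun hh => hc hh.1),
        lstrip_cons_nonspace c (PySem.Chars.rstrip rest) hc',
        lstrip_cons_nonspace c rest hc', rstrip_cons, if_neg (fun hh => hc hh.1)]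

theorem strip_eq_lstrip_rstrip (s : List Char) :
    PySem.Chars.strip s = PySem.Chars.lstrip (PySem.Chars.rstrip s) := by
  rw [lstrip_rstrip_comm]; rfl

theorem map_strip_eq_lstrip_rstrip (l : List (List Char)) :
    (l.map PySem.Chars.rstrip).map PySem.Chars.lstrip = l.map PySem.Chars.strip := by
  rw [List.map_map]
  exact List.map_congr_left fun t _ => (strip_eq_lstrip_rstrip t).symm

theorem map_strip_eq_rstrip_lstrip (l : List (List Char)) :
    (l.map PySem.Chars.lstrip).map PySem.Chars.rstrip = l.map PySem.Chars.strip := by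
  rw [List.map_map]
  exact List.map_congr_left fun t _ => rfl

theorem map_strip_charSplit_strip (cs : List Char) :
    (charSplit ',' (PySem.Chars.strip cs)).map PySem.Chars.strip
      = (charSplit ',' cs).map PySem.Chars.strip := by
  have hX : charSplit ',' (PySem.Chars.strip cs)
      = charSplit ',' (PySem.Chars.rstrip (PySem.Chars.lstrip cs)) := rfl
  calc (charSplit ',' (PySem.Chars.strip cs)).map PySem.Chars.strip
      = ((charSplit ',' (PySem.Chars.strip cs)).map PySem.Chars.rstrip).map
          PySem.Chars.lstrip := (map_strip_eq_lstrip_rstrip _).symm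
    _ = ((charSplit ',' (PySem.Chars.lstrip cs)).map PySem.Chars.rstrip).map
          PySem.Chars.lstrip := by
        rw [hX, map_rstrip_charSplit_rstrip]
    _ = (charSplit ',' (PySem.Chars.lstrip cs)).map PySem.Chars.strip :=
        map_strip_eq_lstrip_rstrip _
    _ = ((charSplit ',' (PySem.Chars.lstrip cs)).map PySem.Chars.lstrip).map
          PySem.Chars.rstrip := (map_strip_eq_rstrip_lstrip _).symm
    _ = ((charSplit ',' cs).map PySem.Chars.lstrip).map PySem.Chars.rstrip := by
        rw [map_lstrip_charSplit_lstrip]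
    _ = (charSplit ',' cs).map PySem.Chars.strip := map_strip_eq_rstrip_lstrip _

theorem tokLine_strip (cs : List Char) : tokLine (PySem.Chars.strip cs) = tokLine cs := by
  unfold tokLine
  rw [map_strip_charSplit_strip]

theorem tokLine_nil : tokLine [] = [] := by decide

theorem tokLine_flatten (ls : List (List Char)) :
    ((ls.flatMap (charSplit ',')).map PySem.Chars.strip).filter (fun t => t ≠ [])
      = ls.flatMap tokLine := by
  induction ls with
  | nil => rfl
  | cons x xs ih =>
    simp only [List.flatMap_cons, List.map_append, List.filter_append, ih]
    rfl

theorem tokLine_join (ls : List (List Char)) :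
    tokLine (PySem.Chars.join [','] ls) = ls.flatMap tokLine := by
  cases ls with
  | nil => exact tokLine_nil
  | cons a r =>
    show tokLine (List.intercalate [','] (a :: r)) = _
    have h1 : tokLine (List.intercalate [','] (a :: r))
        = (((a :: r).flatMap (charSplit ',')).map PySem.Chars.strip).filter
            (fun t => t ≠ []) := by
      unfold tokLine
      rw [charSplit_intercalate ',' (a :: r) (by simp)]
    rw [h1, tokLine_flatten]

-- bridge lemmas to the String-level ports ---------------------------------

theorem str_eq_empty_iff (s : String) : (s = "") ↔ s.toList = [] := by
  constructor
  · intro h; rw [h]; rfl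
  · intro h
    have h2 : s = String.ofList s.toList := by simp
    rw [h2, h]

theorem split_comma_getD (s : String) :
    (PySem.Str.split? s ",").getD [] = (charSplit ',' s.toList).map String.ofList := by
  simp [PySem.Str.split?, PySem.Chars.split?, splitOn_single]

theorem inner_foldl_tok (l : List (List Char)) (acc : List String) :
    l.foldl
      (fun acc t =>
        if PySem.Chars.strip t = [] then acc
        else acc ++ [String.ofList (PySem.Chars.strip t)]) acc
      = acc ++ ((l.map PySem.Chars.strip).filter (fun t => t ≠ [])).map String.ofList := by
  induction l generalizing acc with
  | nil => simp
  | cons t l ih =>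
    by_cases h : PySem.Chars.strip t = []
    · simp [List.foldl_cons, h, ih]
    · simp [List.foldl_cons, h, ih]

theorem strip_ofList (t : List Char) :
    PySem.Str.strip (String.ofList t) = String.ofList (PySem.Chars.strip t) := by
  simp [PySem.Str.strip]

theorem A_eq (block : String) :
    tokenize_initializer_block block
      = ((PySem.Chars.splitlines block.toList).flatMap
          (fun l => (tokLine (PySem.Chars.strip (gComment l))).map String.ofList)) := by
  unfold tokenize_initializer_block
  rw [PySem.Str.splitlines, List.foldl_map]
  have step : ∀ (acc : List String) (l : List Char), l ∈ PySem.Chars.splitlines block.toList →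
      (let clean_line := PySem.Str.strip (strip_line_comment (String.ofList l))
       if clean_line = "" then acc
       else
         ((PySem.Str.split? clean_line ",").getD []).foldl
           (fun acc part =>
             let token := PySem.Str.strip part
             if token = "" then acc else acc ++ [token]) acc)
        = acc ++ (tokLine (PySem.Chars.strip (gComment l))).map String.ofList := by
    intro acc l _
    simp only []
    set clean := PySem.Str.strip (strip_line_comment (String.ofList l)) with hclean
    have hcleanToList : clean.toList = PySem.Chars.strip (gComment l) := by
      rw [hclean, PySem.Str.toList_strip]; rfl
    by_cases h : clean = ""
    · have h0 : PySem.Chars.strip (gComment l) = [] := by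
        rw [← hcleanToList, (str_eq_empty_iff clean).1 h]
      rw [if_pos h, h0, tokLine_nil]
      simp
    · rw [if_neg h, split_comma_getD, hcleanToList, List.foldl_map]
      have : ∀ (acc : List String) (t : List Char),
          (let token := PySem.Str.strip (String.ofList t)
           if token = "" then acc else acc ++ [token])
            = (if PySem.Chars.strip t = [] then acc
               else acc ++ [String.ofList (PySem.Chars.strip t)]) := by
        intro acc t
        show (if PySem.Str.strip (String.ofList t) = "" then acc
              else acc ++ [PySem.Str.strip (String.ofList t)]) = _
        rw [strip_ofList]
        by_cases ht : PySem.Chars.strip t = []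
        · rw [if_pos ((str_eq_empty_iff _).2 (by simp [ht])), if_pos ht]
        · rw [if_neg (fun hh => ht (by simpa using (str_eq_empty_iff _).1 hh)), if_neg ht]
      calc _ = (charSplit ',' (PySem.Chars.strip (gComment l))).foldl
            (fun acc t =>
              if PySem.Chars.strip t = [] then acc
              else acc ++ [String.ofList (PySem.Chars.strip t)]) acc := by
              exact PySem.List.foldl_congr_mem _ _ _ _ (fun a x _ => this a x)
        _ = _ := by rw [inner_foldl_tok]; rfl
  calc _ = (PySem.Chars.splitlines block.toList).foldl
        (fun acc l => acc ++ (tokLine (PySem.Chars.strip (gComment l))).map String.ofList) [] := by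
        exact PySem.List.foldl_congr_mem _ _ _ _ (fun acc x hx => step acc x hx)
    _ = _ := by
        rw [PySem.List.foldl_append_eq_flatMap]; rfl

theorem B_eq (block : String) :
    tokenize_initializer_block_alt block
      = (tokLine (PySem.Chars.join [',']
          ((PySem.Chars.splitlines block.toList).map gComment))).map String.ofList := by
  unfold tokenize_initializer_block_alt
  show (((PySem.Str.split? (PySem.Str.join ","
            ((PySem.Str.splitlines block).map strip_line_comment)) ",").getD []).map
          PySem.Str.strip).filter (fun token => token ≠ "") = _
  rw [split_comma_getD]
  have hjoined : (PySem.Str.join "," ((PySem.Str.splitlines block).map strip_line_comment)).toList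
      = PySem.Chars.join [','] ((PySem.Chars.splitlines block.toList).map gComment) := by
    rw [PySem.Str.toList_join, PySem.Str.splitlines]
    simp [List.map_map]
    rfl
  rw [hjoined, List.map_map]
  have hmaps : List.map (PySem.Str.strip ∘ String.ofList)
        (charSplit ',' (PySem.Chars.join [','] ((PySem.Chars.splitlines block.toList).map gComment)))
      = List.map String.ofList
          ((charSplit ',' (PySem.Chars.join [',']
              ((PySem.Chars.splitlines block.toList).map gComment))).map PySem.Chars.strip) := by
    rw [List.map_map]
    exact List.map_congr_left fun t _ => strip_ofList t
  rw [hmaps, List.filter_map]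
  unfold tokLine
  congr 1
  apply List.filter_congr
  intro t _
  simp only [Function.comp_apply]
  by_cases ht : t = []
  · subst ht; decide
  · have hne : String.ofList t ≠ "" := fun hh => ht (by simpa using congrArg String.toList hh)
    simp [hne, ht]

-- ===== VERDICT (by name: the statement is the Claim_ definition above) =====
theorem tokenize_initializer_block_spec : Claim_equal_tokenize_initializer_block := by
  intro block _
  show tokenize_initializer_block block = tokenize_initializer_block_alt block
  rw [A_eq, B_eq, tokLine_join, List.map_flatMap, List.flatMap_map]
  simp only [tokLine_strip]
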